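-- pv_equiv track=rewrite | github.com/plaaxer/parsers-generator | src/scanner_framework/regex_processor.py | _handle_escapes
-- ===== SOURCE A (Python) =====
-- from typing import Set, Dict, Tuple, List, Optional, FrozenSet
--
-- def _handle_escapes(regex: str) -> Tuple[str, Dict[str, str]]:
--     """
--     Substitui sequências de escape (e.g., '\(', '\*') por caracteres placeholder
--     de uso privado para que não sejam processados como operadores.
--
--     Retorna a regex processada e um mapa do placeholder para o caractere original.
--     """
--     processed_regex = []
--     placeholder_map: Dict[str, str] = {}
--     # Usamos a Área de Uso Privado do Unicode para placeholders seguros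
--     next_placeholder_code = 0xE000
--
--     i = 0
--     n = len(regex)
--     while i < n:
--         if regex[i] == '\\' and i + 1 < n:
--             original_char = regex[i + 1]
--
--             # Verifica se já existe um placeholder para este caractere
--             # Isso é ineficiente, mas mais simples. Para otimizar, poderíamos usar um mapa reverso.
--             found_placeholder = None
--             for p, o_char in placeholder_map.items():
--                 if o_char == original_char:
--                     found_placeholder = p
--                     break
--
--             if found_placeholder:
--                 placeholder = found_placeholder
--             else:
--                 placeholder = chr(next_placeholder_code)
--                 placeholder_map[placeholder] = original_char
--                 next_placeholder_code += 1
--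
--             processed_regex.append(placeholder)
--             i += 2  # Pula o caractere de escape e o caractere escapado
--         else:
--             processed_regex.append(regex[i])
--             i += 1
--
--     return "".join(processed_regex), placeholder_map
-- ===== SOURCE B (Python) =====
-- def _handle_escapes(regex):
--     """Chunk-stitching with str.find: jump from backslash to backslash,
--     copy the literal span between them whole with a slice, and map each
--     escaped char through a reverse dict; no per-character scanning loop."""
--     out = []
--     placeholder_map = {}
--     rev = {}
--     n = len(regex)
--     prev = 0
--     i = regex.find('\\')
--     while 0 <= i < n - 1:
--         out.append(regex[prev:i])
--         c = regex[i + 1]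
--         if c not in rev:
--             p = chr(0xE000 + len(rev))
--             rev[c] = p
--             placeholder_map[p] = c
--         out.append(rev[c])
--         prev = i + 2
--         i = regex.find('\\', i + 2)
--     out.append(regex[prev:])
--     return ''.join(out), placeholder_map
-- ===== Notes on version B (the rewrite author's own statement) =====
-- stated objective: faster
-- what changed: Replaces the per-character index loop (which re-scans placeholder_map.items() linearly at every escape) by a chunk-stitching loop that jumps from backslash to backslash with str.find, copies each literal span whole as one slice, and resolves escaped chars through a reverse dict.
import Mathlib
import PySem

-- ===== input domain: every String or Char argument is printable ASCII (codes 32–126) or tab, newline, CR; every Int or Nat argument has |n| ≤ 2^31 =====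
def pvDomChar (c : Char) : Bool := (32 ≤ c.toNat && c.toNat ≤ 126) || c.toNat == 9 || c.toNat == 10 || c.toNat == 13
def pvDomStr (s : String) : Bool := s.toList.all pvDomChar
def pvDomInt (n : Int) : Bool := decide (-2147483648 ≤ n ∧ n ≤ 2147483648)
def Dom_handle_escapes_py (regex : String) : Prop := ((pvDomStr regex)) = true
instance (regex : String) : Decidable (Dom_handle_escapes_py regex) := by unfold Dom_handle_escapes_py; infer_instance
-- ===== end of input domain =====

-- B replaces A's per-character index loop (with a linear inner scan of the
-- placeholder map per escape) by a chunk-stitching loop that jumps between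
-- backslashes with find, slices literal spans whole, and keeps a reverse map;
-- return values proved equal on Dom.

-- ===== PORT A =====
-- inner 'for p, o_char in placeholder_map.items()' search loop of A
def pvFindPh : List (String × String) → String → Option String
  | [], _ => none
  | (p, o) :: rest, t => if o = t then some p else pvFindPh rest t

-- the 'while i < n' loop of A
def pvLoopA (cs : List Char) (i : Nat) (acc : List String)
    (map : PySem.Dict String String) (next : Nat) :
    List String × PySem.Dict String String :=
  if h : i < cs.length then
    if hb : cs[i] = '\\' ∧ i + 1 < cs.length then
      let oc : String := String.ofList [cs[i+1]'hb.2]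
      match pvFindPh map.items oc with
      | some p => pvLoopA cs (i+2) (acc ++ [p]) map next
      | none =>
          let p := String.ofList [Char.ofNat next]
          pvLoopA cs (i+2) (acc ++ [p]) (map.insert p oc) (next+1)
    else
      pvLoopA cs (i+1) (acc ++ [String.ofList [cs[i]]]) map next
  else (acc, map)
termination_by cs.length - i

def handle_escapes_py (regex : String) : String × (List (String × String)) :=
  let r := pvLoopA regex.toList 0 [] PySem.Dict.empty 0xE000
  (PySem.Str.join "" r.1, r.2.items)

-- ===== PORT B =====
-- the 'while 0 <= i < n - 1' loop of B; fuel only makes the recursion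
-- structural (the proofs show it is never exhausted); state = (prev, i, out, rev, pm)
def pvLoopB (cs : List Char) : Nat → Nat → Int → List String →
    PySem.Dict String String → PySem.Dict String String →
    List String × PySem.Dict String String
  | 0, prev, _, out, _, pm =>
      (out ++ [String.ofList (PySem.List.slice cs (some (prev : Int)) none)], pm)
  | fuel+1, prev, i, out, rev, pm =>
    if h : 0 ≤ i ∧ i < (cs.length : Int) - 1 then
      have hlt : i.toNat + 1 < cs.length := by omega
      let head := String.ofList (PySem.List.slice cs (some (prev : Int)) (some i))
      let c := String.ofList [cs[i.toNat + 1]'hlt]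
      if rev.contains c then
        pvLoopB cs fuel (i.toNat + 2) (PySem.Chars.findFrom cs ['\\'] (i + 2) none)
          (out ++ [head, rev.getD c ""]) rev pm
      else
        let p := String.ofList [Char.ofNat (0xE000 + rev.size)]
        pvLoopB cs fuel (i.toNat + 2) (PySem.Chars.findFrom cs ['\\'] (i + 2) none)
          (out ++ [head, p]) (rev.insert c p) (pm.insert p c)
    else (out ++ [String.ofList (PySem.List.slice cs (some (prev : Int)) none)], pm)

def handle_escapes_py_alt (regex : String) : String × (List (String × String)) :=
  let cs := regex.toList
  let r := pvLoopB cs (cs.length + 1) 0 (PySem.Chars.find cs ['\\']) []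
      PySem.Dict.empty PySem.Dict.empty
  (PySem.Str.join "" r.1, r.2.items)

-- ===== PRECONDITION & SPEC =====
def Spec_handle_escapes_py (regex : String) (out : String × (List (String × String))) : Prop := out = handle_escapes_py_alt regex
instance (regex : String) (out : String × (List (String × String))) : Decidable (Spec_handle_escapes_py regex out) := by unfold Spec_handle_escapes_py; infer_instance

-- ===== CLAIM (what is proved, stated in full; the proofs are below) =====
def Claim_equal_handle_escapes_py : Prop := ∀ (regex : String), Dom_handle_escapes_py regex → Spec_handle_escapes_py regex (handle_escapes_py regex)

-- ===== LEMMAS AND PROOFS =====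

-- placeholder string for index k
def pvPch (k : Nat) : String := String.ofList [Char.ofNat (0xE000 + k)]

-- the forward map A (and B's placeholder_map) maintains is the item-wise swap of B's reverse map
def pvSwapD (d : PySem.Dict String String) : PySem.Dict String String :=
  PySem.Dict.mk (d.items.map (fun p => (p.2, p.1)))

-- invariant on B's reverse map
def pvInv (rev : PySem.Dict String String) : Prop :=
  rev.keys.Nodup ∧
  (∀ k ∈ rev.keys, ∃ c : Char, pvDomChar c = true ∧ k = String.ofList [c]) ∧
  rev.values = (List.range rev.size).map pvPch

lemma pvPch_inj {a b : Nat} (ha : a ≤ 127) (hb : b ≤ 127) (h : pvPch a = pvPch b) : a = b := by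
  have hva : (0xE000 + a).isValidChar := by right; constructor <;> omega
  have hvb : (0xE000 + b).isValidChar := by right; constructor <;> omega
  have h2 : Char.ofNat (0xE000 + a) = Char.ofNat (0xE000 + b) := by
    have := congrArg String.toList h
    simpa [pvPch] using this
  have h3 := congrArg Char.toNat h2
  simp [Char.ofNat, hva, hvb] at h3
  omega

lemma pvSize_le (rev : PySem.Dict String String) (h : pvInv rev) : rev.size ≤ 127 := by
  obtain ⟨hnd, hkeys, _⟩ := h
  have hsize : rev.size = rev.keys.length := by
    simp [PySem.Dict.size, PySem.Dict.keys]
  have hinj : ∀ x ∈ rev.keys, ∀ y ∈ rev.keys,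
      (fun s : String => s.toList.headI.toNat) x = (fun s => s.toList.headI.toNat) y → x = y := by
    intro x hx y hy hxy
    obtain ⟨c, hc, rfl⟩ := hkeys x hx
    obtain ⟨c', hc', rfl⟩ := hkeys y hy
    simp [String.toList_ofList] at hxy ⊢
    exact congrArg (fun c => String.ofList [c]) (Char.ext (UInt32.toNat_inj.mp hxy))
  have hnd2 : (rev.keys.map (fun s : String => s.toList.headI.toNat)).Nodup :=
    List.Nodup.map_on hinj hnd
  have hsub : (rev.keys.map (fun s : String => s.toList.headI.toNat)) ⊆ List.range 127 := by
    intro x hx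
    simp only [List.mem_map] at hx
    obtain ⟨s, hs, rfl⟩ := hx
    obtain ⟨c, hc, rfl⟩ := hkeys s hs
    simp only [pvDomChar, Bool.or_eq_true, Bool.and_eq_true, decide_eq_true_eq, beq_iff_eq] at hc
    simp [String.toList_ofList, List.mem_range]
    omega
  have := (List.subperm_of_subset hnd2 hsub).length_le
  simp at this
  omega

lemma pvFresh (rev : PySem.Dict String String) (h : pvInv rev) :
    pvPch rev.size ∉ rev.values := by
  intro hmem
  rw [h.2.2] at hmem
  simp only [List.mem_map, List.mem_range] at hmem
  obtain ⟨j, hj, hje⟩ := hmem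
  have := pvPch_inj (le_trans (Nat.le_of_lt hj) (pvSize_le rev h)) (pvSize_le rev h) hje
  omega

lemma pvInv_insert (rev : PySem.Dict String String) (h : pvInv rev) (c : Char)
    (hc : pvDomChar c = true) (hs : rev.contains (String.ofList [c]) = false) :
    pvInv (rev.insert (String.ofList [c]) (pvPch rev.size)) := by
  have hitems := PySem.Dict.items_insert_of_not_contains (d := rev)
      (k := String.ofList [c]) (v := pvPch rev.size) hs
  refine ⟨?_, ?_, ?_⟩
  · exact PySem.Dict.nodup_keys_insert _ _ _ h.1
  · intro k hk
    rw [PySem.Dict.mem_keys_insert] at hk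
    rcases hk with rfl | hk
    · exact ⟨c, hc, rfl⟩
    · exact h.2.1 k hk
  · have hv : rev.items.map (·.2) = (List.range rev.items.length).map pvPch := by
      have := h.2.2
      simpa [PySem.Dict.values, PySem.Dict.size] using this
    simp only [PySem.Dict.values, PySem.Dict.size] at hitems ⊢
    rw [hitems]
    simp [hv, List.range_succ]

lemma pvSwap_insert (rev : PySem.Dict String String) (h : pvInv rev) (s : String)
    (hs : rev.contains s = false) :
    (pvSwapD rev).insert (pvPch rev.size) s = pvSwapD (rev.insert s (pvPch rev.size)) := by
  have hfresh := pvFresh rev h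
  have hc : (pvSwapD rev).contains (pvPch rev.size) = false := by
    rw [← Bool.not_eq_true, PySem.Dict.contains_iff_mem_keys]
    intro hmem
    apply hfresh
    simpa [pvSwapD, PySem.Dict.keys, PySem.Dict.values, List.map_map, Function.comp] using hmem
  apply PySem.Dict.ext
  have h1 := PySem.Dict.items_insert_of_not_contains _ s hc
  rw [h1]
  simp [pvSwapD, PySem.Dict.items_insert_of_not_contains _ (pvPch rev.size) hs]

lemma pvFind_swap (l : List (String × String)) (t : String) :
    pvFindPh (l.map (fun p => (p.2, p.1))) t = (PySem.Dict.mk l).get? t := by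
  induction l with
  | nil => simp [pvFindPh, PySem.Dict.get?]
  | cons hd tl ih =>
      obtain ⟨k, v⟩ := hd
      simp only [List.map_cons, pvFindPh, PySem.Dict.get?_mk_cons, beq_iff_eq, ih]

-- ''.join concatenates
lemma pvJoinNil (parts : List (List Char)) :
    PySem.Chars.join [] parts = parts.flatten := by
  induction parts with
  | nil => simp [PySem.Chars.join_nil]
  | cons p rest ih =>
      cases rest with
      | nil => simp [PySem.Chars.join_singleton]
      | cons q t =>
          rw [PySem.Chars.join_cons_cons]
          simp [ih]

-- [c] is a prefix iff the head is c
lemma pvPrefixSingleton {c : Char} {l : List Char} : [c] <+: l ↔ l.head? = some c := by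
  constructor
  · rintro ⟨t, rfl⟩; rfl
  · intro h
    cases l with
    | nil => simp at h
    | cons a t =>
        simp at h
        exact ⟨t, by simp [h]⟩

-- singleton infix iff membership
lemma pvInfixSingleton {c : Char} {l : List Char} : [c] <:+: l ↔ c ∈ l := by
  constructor
  · intro h
    exact List.singleton_sublist.mp h.sublist
  · intro h
    obtain ⟨s, t, rfl⟩ := List.append_of_mem h
    exact ⟨s, t, by simp⟩

-- A's loop walks through a backslash-free span literally
lemma pvLoopA_run (cs : List Char) (d : Nat) : ∀ (i : Nat) (acc : List String)
    (map : PySem.Dict String String) (next : Nat),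
    i + d ≤ cs.length →
    (∀ m (hm : m < cs.length), i ≤ m → m < i + d → cs[m] ≠ '\\') →
    pvLoopA cs i acc map next
      = pvLoopA cs (i + d)
          (acc ++ ((cs.drop i).take d).map (fun c => String.ofList [c])) map next := by
  induction d with
  | zero => intro i acc map next _ _; simp
  | succ d ih =>
      intro i acc map next hle hclean
      have hi : i < cs.length := by omega
      have hne : cs[i] ≠ '\\' := hclean i hi (le_refl i) (by omega)
      rw [pvLoopA, dif_pos hi, dif_neg (by intro hb; exact hne hb.1)]
      have := ih (i+1) (acc ++ [String.ofList [cs[i]]]) map next (by omega)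
        (fun m hm h1 h2 => hclean m hm (by omega) (by omega))
      rw [this]
      have hdrop : cs.drop i = cs[i] :: cs.drop (i+1) := List.drop_eq_getElem_cons hi
      rw [hdrop]
      simp only [List.take_succ_cons, List.map_cons, List.append_assoc, List.cons_append,
        List.nil_append, Nat.add_right_comm i 1 d]
      rw [Nat.add_assoc]

-- characterization of find for the single-char pattern
lemma pvFind_neg (s : List Char) (h : PySem.Chars.find s ['\\'] = -1) :
    ∀ m (hm : m < s.length), s[m] ≠ '\\' := by
  intro m hm hc
  rw [PySem.Chars.find_eq_neg_one_iff] at h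
  exact h (pvInfixSingleton.mpr (hc ▸ List.getElem_mem hm))

lemma pvFind_pos (s : List Char) (h : PySem.Chars.find s ['\\'] ≠ -1) :
    (PySem.Chars.find s ['\\']).toNat < s.length ∧
    s[(PySem.Chars.find s ['\\']).toNat]? = some '\\' ∧
    (∀ m (hm : m < s.length), m < (PySem.Chars.find s ['\\']).toNat → s[m] ≠ '\\') := by
  have h0 : 0 ≤ PySem.Chars.find s ['\\'] := by
    have := PySem.Chars.neg_one_le_find s ['\\']
    omega
  obtain ⟨hpre, hmin⟩ := PySem.Chars.find_spec (s := s) (sub := ['\\']) h0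
  have hhd : (s.drop (PySem.Chars.find s ['\\']).toNat).head? = some '\\' :=
    pvPrefixSingleton.mp hpre
  rw [List.head?_drop] at hhd
  refine ⟨?_, hhd, ?_⟩
  · by_contra hge
    push Not at hge
    simp [List.getElem?_eq_none hge] at hhd
  · intro m hm hlt hc
    exact hmin m hlt (pvPrefixSingleton.mpr (by rw [List.head?_drop]; simp [hc, hm]))

lemma pvFlatComp (l : List Char) :
    (List.map (String.toList ∘ fun c => String.ofList [c]) l).flatten = l := by
  induction l with
  | nil => rfl
  | cons a t ih => simp [ih]

-- main equivalence induction: A from index prev = B's stitching loop on the rest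
lemma pvMainB (cs : List Char) (hdom : ∀ c ∈ cs, pvDomChar c = true) :
    ∀ (k : Nat), ∀ (prev fuel : Nat) (acc1 acc2 : List String)
      (rev : PySem.Dict String String),
      prev ≤ cs.length → cs.length - prev ≤ k → cs.length - prev < fuel →
      pvInv rev →
      (acc1.map String.toList).flatten = (acc2.map String.toList).flatten →
      ((pvLoopA cs prev acc1 (pvSwapD rev) (0xE000 + rev.size)).1.map String.toList).flatten
        = ((pvLoopB cs fuel prev (PySem.Chars.findFrom cs ['\\'] (prev : Int) none)
            acc2 rev (pvSwapD rev)).1.map String.toList).flatten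
      ∧ (pvLoopA cs prev acc1 (pvSwapD rev) (0xE000 + rev.size)).2
        = (pvLoopB cs fuel prev (PySem.Chars.findFrom cs ['\\'] (prev : Int) none)
            acc2 rev (pvSwapD rev)).2 := by
  intro k
  induction k with
  | zero =>
      intro prev fuel acc1 acc2 rev hprev hk hfuel hInv hacc
      obtain ⟨fu, rfl⟩ : ∃ fu, fuel = fu + 1 := ⟨fuel - 1, by omega⟩
      have hnil : cs.drop prev = [] := List.drop_eq_nil_of_le (by omega)
      have hf : PySem.Chars.find (cs.drop prev) ['\\'] = -1 := by
        rw [PySem.Chars.find_eq_neg_one_iff, hnil]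
        intro h
        exact absurd (pvInfixSingleton.mp h) (by simp)
      rw [PySem.Chars.findFrom_natCast cs ['\\'] prev hprev, if_pos hf]
      rw [pvLoopB, dif_neg (by omega)]
      rw [pvLoopA, dif_neg (by omega)]
      rw [PySem.List.slice_from_natCast, hnil]
      constructor
      · simp [hacc]
      · rfl
  | succ k ih =>
      intro prev fuel acc1 acc2 rev hprev hk hfuel hInv hacc
      obtain ⟨fu, rfl⟩ : ∃ fu, fuel = fu + 1 := ⟨fuel - 1, by omega⟩
      rw [PySem.Chars.findFrom_natCast cs ['\\'] prev hprev]
      by_cases hf : PySem.Chars.find (cs.drop prev) ['\\'] = -1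
      · -- no backslash in the rest: B exits with the whole suffix, A walks it literally
        rw [if_pos hf]
        have hclean : ∀ m (hm : m < cs.length), prev ≤ m → m < prev + (cs.drop prev).length → cs[m] ≠ '\\' := by
          intro m hm h1 h2 hc
          have hj : m - prev < (cs.drop prev).length := by omega
          have := pvFind_neg _ hf (m - prev) hj
          rw [List.getElem_drop] at this
          simp only [Nat.add_sub_cancel' h1] at this
          exact this hc
        have hrun := pvLoopA_run cs (cs.drop prev).length prev acc1 (pvSwapD rev) (0xE000 + rev.size)
          (by simp; omega) hclean
        rw [hrun, List.take_length]
        rw [pvLoopA, dif_neg (by simp; omega)]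
        rw [pvLoopB, dif_neg (by omega)]
        rw [PySem.List.slice_from_natCast]
        constructor
        · simp only [List.map_append, List.flatten_append, hacc, List.map_map, List.map_cons,
            List.map_nil, List.flatten_cons, List.flatten_nil, List.append_nil,
            String.toList_ofList, pvFlatComp]
        · rfl
      · -- there is a backslash at prev + ft
        rw [if_neg hf]
        obtain ⟨hftlen, hbs, hmin⟩ := pvFind_pos _ hf
        have h0f : 0 ≤ PySem.Chars.find (cs.drop prev) ['\\'] := by
          have := PySem.Chars.neg_one_le_find (cs.drop prev) ['\\']; omega
        set ft := (PySem.Chars.find (cs.drop prev) ['\\']).toNat with hftdef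
        have hslen : (cs.drop prev).length = cs.length - prev := by simp
        have hIlt : prev + ft < cs.length := by omega
        have hcast : (prev : Int) + PySem.Chars.find (cs.drop prev) ['\\'] = ((prev + ft : Nat) : Int) := by
          omega
        rw [hcast]
        have hbs' : cs[prev + ft]'hIlt = '\\' := by
          have : (cs.drop prev)[ft]'(by omega) = '\\' := by
            have := hbs
            rwa [List.getElem?_eq_getElem (by omega), Option.some_inj] at this
          rwa [List.getElem_drop] at this
        have hclean : ∀ m (hm : m < cs.length), prev ≤ m → m < prev + ft → cs[m] ≠ '\\' := by
          intro m hm h1 h2 hc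
          have hj : m - prev < (cs.drop prev).length := by omega
          have := hmin (m - prev) hj (by omega)
          rw [List.getElem_drop] at this
          simp only [Nat.add_sub_cancel' h1] at this
          exact this hc
        have hrun := pvLoopA_run cs ft prev acc1 (pvSwapD rev) (0xE000 + rev.size)
          (by omega) hclean
        by_cases hend : prev + ft + 1 = cs.length
        · -- lone trailing backslash: B exits; A appends it literally and stops
          rw [pvLoopB, dif_neg (by omega)]
          rw [hrun]
          rw [pvLoopA, dif_pos hIlt, dif_neg (by intro hb; exact absurd hb.2 (by omega))]
          rw [pvLoopA, dif_neg (by omega)]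
          rw [PySem.List.slice_from_natCast]
          refine ⟨?_, rfl⟩
          have hsplit : cs.drop prev = (cs.drop prev).take ft ++ ['\\'] := by
            conv_lhs => rw [← List.take_append_drop ft (cs.drop prev)]
            congr 1
            rw [List.drop_eq_getElem_cons (by omega)]
            rw [List.getElem_drop]
            rw [show (cs.drop prev).drop (ft + 1) = cs.drop (prev + (ft + 1)) by rw [List.drop_drop]]
            rw [List.drop_eq_nil_of_le (by omega)]
            rw [hbs']
          simp only [List.map_append, List.flatten_append, hacc, List.map_map, List.map_cons,
            List.map_nil, List.flatten_cons, List.flatten_nil, List.append_nil, List.append_assoc,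
            String.toList_ofList, pvFlatComp]
          conv_rhs => rw [hsplit]
          simp [hbs']
        · -- a real escape pair at prev + ft
          have hpair : prev + ft + 1 < cs.length := by omega
          rw [pvLoopB, dif_pos (by constructor <;> omega)]
          simp only [Int.toNat_natCast]
          rw [hrun]
          rw [pvLoopA, dif_pos hIlt, dif_pos ⟨hbs', hpair⟩]
          have hfindeq : pvFindPh (pvSwapD rev).items (String.ofList [cs[prev + ft + 1]'hpair])
              = rev.get? (String.ofList [cs[prev + ft + 1]'hpair]) := by
            have := pvFind_swap rev.items (String.ofList [cs[prev + ft + 1]'hpair])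
            simpa [pvSwapD] using this
          have hhead : PySem.List.slice cs (some (prev : Int)) (some ((prev + ft : Nat) : Int))
              = (cs.drop prev).take ft := by
            rw [PySem.List.slice_toNat cs (by omega) (by omega)]
            simp only [Int.toNat_natCast]
            congr 1
            omega
          have hcast2 : ((prev + ft : Nat) : Int) + 2 = ((prev + ft + 2 : Nat) : Int) := by omega
          by_cases hcont : rev.contains (String.ofList [cs[prev + ft + 1]'hpair]) = true
          · obtain ⟨p, hp⟩ : ∃ p, rev.get? (String.ofList [cs[prev + ft + 1]'hpair]) = some p := by
              have := PySem.Dict.contains_eq_isSome_get? (d := rev) (k := String.ofList [cs[prev + ft + 1]'hpair])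
              rw [hcont] at this
              exact Option.isSome_iff_exists.mp this.symm
            rw [if_pos hcont]
            simp only [hfindeq, hp]
            rw [hcast2]
            have hgetD : rev.getD (String.ofList [cs[prev + ft + 1]'hpair]) "" = p := by
              rw [PySem.Dict.getD_eq_get?_getD, hp]; rfl
            rw [hgetD, hhead]
            exact ih (prev + ft + 2) fu _ _ rev (by omega) (by omega) (by omega) hInv
              (by simp only [List.map_append, List.flatten_append, hacc, List.map_map, List.map_cons,
            List.map_nil, List.flatten_cons, List.flatten_nil, List.append_nil, List.append_assoc,
            String.toList_ofList, pvFlatComp])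
          · have hcf : rev.contains (String.ofList [cs[prev + ft + 1]'hpair]) = false := by
              simpa using hcont
            have hgn : rev.get? (String.ofList [cs[prev + ft + 1]'hpair]) = none := by
              have := PySem.Dict.contains_eq_isSome_get? (d := rev) (k := String.ofList [cs[prev + ft + 1]'hpair])
              rw [hcf] at this
              simpa using this.symm
            rw [if_neg (by simp [hcf])]
            simp only [hfindeq, hgn]
            rw [hcast2, hhead]
            have hdomc : pvDomChar (cs[prev + ft + 1]'hpair) = true := hdom _ (List.getElem_mem hpair)
            have hInv' := pvInv_insert rev hInv (cs[prev + ft + 1]'hpair) hdomc hcf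
            have hswap := pvSwap_insert rev hInv (String.ofList [cs[prev + ft + 1]'hpair]) hcf
            have hsize : (rev.insert (String.ofList [cs[prev + ft + 1]'hpair]) (pvPch rev.size)).size
                = rev.size + 1 := by
              have h2 := PySem.Dict.items_insert_of_not_contains _ (pvPch rev.size) hcf
              simp only [PySem.Dict.size] at h2 ⊢
              rw [h2]
              simp
            have := ih (prev + ft + 2) fu
              (acc1 ++ List.map (fun c => String.ofList [c]) ((cs.drop prev).take ft) ++ [pvPch rev.size])
              (acc2 ++ [String.ofList ((cs.drop prev).take ft), pvPch rev.size])
              (rev.insert (String.ofList [cs[prev + ft + 1]'hpair]) (pvPch rev.size))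
              (by omega) (by omega) (by omega) hInv'
              (by simp only [List.map_append, List.flatten_append, hacc, List.map_map, List.map_cons,
            List.map_nil, List.flatten_cons, List.flatten_nil, List.append_nil, List.append_assoc,
            String.toList_ofList, pvFlatComp])
            rw [hsize] at this
            rw [← hswap] at this
            have harith : 0xE000 + (rev.size + 1) = (0xE000 + rev.size) + 1 := by omega
            rw [harith] at this
            exact this

-- ===== VERDICT (by name: the statement is the Claim_ definition above) =====
theorem handle_escapes_py_spec : Claim_equal_handle_escapes_py := by
  intro regex hdom
  unfold Spec_handle_escapes_py handle_escapes_py handle_escapes_py_alt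
  have hdom' : ∀ c ∈ regex.toList, pvDomChar c = true := by
    have h0 : pvDomStr regex = true := hdom
    simpa [pvDomStr, List.all_eq_true] using h0
  have hInv0 : pvInv (PySem.Dict.empty : PySem.Dict String String) := by
    refine ⟨by simp, by simp, by simp [PySem.Dict.values, PySem.Dict.size, PySem.Dict.empty]⟩
  have h := pvMainB regex.toList hdom' regex.toList.length 0 (regex.toList.length + 1)
      [] [] PySem.Dict.empty (by omega) (by omega) (by omega) hInv0 rfl
  rw [show pvSwapD PySem.Dict.empty = (PySem.Dict.empty : PySem.Dict String String) from rfl] at h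
  rw [show (PySem.Dict.empty : PySem.Dict String String).size = 0 from rfl] at h
  rw [Nat.add_zero] at h
  rw [show ((0 : Nat) : Int) = (0 : Int) from rfl, PySem.Chars.findFrom_zero] at h
  obtain ⟨hjoin, hmap⟩ := h
  have hj : ∀ o : List String, PySem.Str.join "" o = String.ofList ((o.map String.toList).flatten) := by
    intro o
    simp [PySem.Str.join, pvJoinNil]
  simp only [hj, hjoin, hmap]
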